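-- pv_equiv track=rewrite | github.com/Ahhgust/PeptideRMP | gvp2null.py | getPair
-- ===== SOURCE A (Python) =====
-- def getPair(v):
--   """
--   Parses a variant (9338V)
--   and splits it into its numeric and alphabetic bits...
--   """
--
--   i=0
--   vlen = len(v)
--   num = 0
--
--   while i < vlen:
--     if v[i] >= '0' and v[i] <= '9':
--       num = (num*10) + int(v[i])
--       i += 1
--     else:
--       break
--
--   # some variants have a trailing * to indicate the end of protein sequence...
--   #if v[-1] == '*' and i < vlen - 1:
--     #return(num, v[i:-1])
--   return(num, v[i:])
-- ===== SOURCE B (Python) =====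
-- def getPair(v):
--   # split off the leading digit run with lstrip, then read it right-to-left as a positional sum
--   rest = v.lstrip("0123456789")
--   num = 0
--   place = 1
--   for c in reversed(v[:len(v) - len(rest)]):
--     num += (ord(c) - 48) * place
--     place *= 10
--   return (num, rest)
-- ===== Notes on version B (the rewrite author's own statement) =====
-- stated objective: alternative
-- what changed: A scans forward with an index, Horner-accumulating each digit and breaking at the first non-digit; B first splits off the leading digit run with lstrip and then evaluates it right-to-left as a positional sum with a running power of ten.
import Mathlib
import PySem

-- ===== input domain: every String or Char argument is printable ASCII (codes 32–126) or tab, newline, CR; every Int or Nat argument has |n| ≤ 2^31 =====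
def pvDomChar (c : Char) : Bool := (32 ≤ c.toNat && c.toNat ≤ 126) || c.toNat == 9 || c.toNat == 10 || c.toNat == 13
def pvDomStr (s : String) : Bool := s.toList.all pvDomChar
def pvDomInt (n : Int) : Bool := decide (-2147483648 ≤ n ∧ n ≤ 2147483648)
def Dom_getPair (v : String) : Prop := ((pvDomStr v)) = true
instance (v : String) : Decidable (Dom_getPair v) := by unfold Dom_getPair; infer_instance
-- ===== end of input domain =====

-- B splits the leading digit run off with lstrip and reads it right-to-left as a positional
-- sum, instead of A's forward index loop with Horner accumulation and break; objective: alternative.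


-- ===== PORT A =====
-- while i < vlen: if '0' <= v[i] <= '9': num = num*10 + int(v[i]); i += 1 else break
-- (the loop state (remaining characters, num); int(c) for a digit char c is ord(c) - 48, exact)
def getPairLoop : List Char → Int → Int × List Char
  | [], num => (num, [])
  | c :: cs, num =>
    if '0' ≤ c ∧ c ≤ '9' then getPairLoop cs (num * 10 + ((c.toNat : Int) - 48))
    else (num, c :: cs)

def getPair (v : String) : Int × String :=
  let r := getPairLoop v.toList 0
  (r.1, String.ofList r.2)

-- ===== PORT B =====
-- v.lstrip("0123456789") drops the leading characters belonging to the set — exact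
def pvDigitChars : List Char := ['0', '1', '2', '3', '4', '5', '6', '7', '8', '9']

def getPair_alt (v : String) : Int × String :=
  let cs := v.toList
  let rest := cs.dropWhile (fun c => decide (c ∈ pvDigitChars))
  let digits := cs.take (cs.length - rest.length)       -- v[:len(v) - len(rest)]
  let r := digits.reverse.foldl
    (fun (p : Int × Int) c => (p.1 + ((c.toNat : Int) - 48) * p.2, p.2 * 10)) (0, 1)
  (r.1, String.ofList rest)

-- ===== PRECONDITION & SPEC =====
def Spec_getPair (v : String) (out : Int × String) : Prop := out = getPair_alt v
instance (v : String) (out : Int × String) : Decidable (Spec_getPair v out) := by unfold Spec_getPair; infer_instance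

-- ===== CLAIM (what is proved, stated in full; the proofs are below) =====
def Claim_equal_getPair : Prop := ∀ (v : String), Dom_getPair v → Spec_getPair v (getPair v)

-- ===== LEMMAS AND PROOFS =====

theorem pv_char_inj (c d : Char) (h : c.toNat = d.toNat) : c = d :=
  Char.ext (UInt32.toNat_inj.mp h)

-- A's digit test and B's membership test agree on every character
theorem pv_digit_mem (c : Char) : (c ∈ pvDigitChars) ↔ ('0' ≤ c ∧ c ≤ '9') := by
  simp only [pvDigitChars, List.mem_cons, List.not_mem_nil, or_false, Char.le_def,
    UInt32.le_iff_toNat_le]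
  constructor
  · rintro (rfl | rfl | rfl | rfl | rfl | rfl | rfl | rfl | rfl | rfl) <;> exact ⟨by decide, by decide⟩
  · rintro ⟨h1, h2⟩
    have e1 : ('0').val.toNat = 48 := by decide
    have e2 : ('9').val.toNat = 57 := by decide
    rw [e1] at h1; rw [e2] at h2
    interval_cases h : c.val.toNat <;>
      first
        | exact .inl (pv_char_inj _ _ h)
        | exact .inr (.inl (pv_char_inj _ _ h))
        | exact .inr (.inr (.inl (pv_char_inj _ _ h)))
        | exact .inr (.inr (.inr (.inl (pv_char_inj _ _ h))))
        | exact .inr (.inr (.inr (.inr (.inl (pv_char_inj _ _ h)))))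
        | exact .inr (.inr (.inr (.inr (.inr (.inl (pv_char_inj _ _ h))))))
        | exact .inr (.inr (.inr (.inr (.inr (.inr (.inl (pv_char_inj _ _ h)))))))
        | exact .inr (.inr (.inr (.inr (.inr (.inr (.inr (.inl (pv_char_inj _ _ h))))))))
        | exact .inr (.inr (.inr (.inr (.inr (.inr (.inr (.inr (.inl (pv_char_inj _ _ h)))))))))
        | exact .inr (.inr (.inr (.inr (.inr (.inr (.inr (.inr (.inr (pv_char_inj _ _ h)))))))))

def pvDigit (c : Char) : Bool := decide (c ∈ pvDigitChars)

-- little-endian value of a digit list (head = units)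
def pvLE : List Char → Int
  | [] => 0
  | c :: cs => ((c.toNat : Int) - 48) + 10 * pvLE cs

theorem pv_LE_append (xs : List Char) (c : Char) :
    pvLE (xs ++ [c]) = pvLE xs + ((c.toNat : Int) - 48) * 10 ^ xs.length := by
  induction xs with
  | nil => simp [pvLE]
  | cons x xs ih => simp [pvLE, ih]; ring

-- B's fold computes the little-endian value and the running power of ten
theorem pv_fold_eq (ds : List Char) (num place : Int) :
    ds.foldl (fun (p : Int × Int) c => (p.1 + ((c.toNat : Int) - 48) * p.2, p.2 * 10)) (num, place)
      = (num + place * pvLE ds, place * 10 ^ ds.length) := by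
  induction ds generalizing num place with
  | nil => simp [pvLE]
  | cons c cs ih => simp [List.foldl, ih, pvLE]; constructor <;> ring

-- A's loop splits at the digit/non-digit boundary and Horner-accumulates the digit run
theorem pv_loop_eq (cs : List Char) (num : Int) :
    getPairLoop cs num
      = (num * 10 ^ (cs.takeWhile pvDigit).length + pvLE (cs.takeWhile pvDigit).reverse,
         cs.dropWhile pvDigit) := by
  induction cs generalizing num with
  | nil => simp [getPairLoop, pvLE]
  | cons c cs ih =>
    by_cases h : '0' ≤ c ∧ c ≤ '9'
    · have hd : pvDigit c = true := by simp [pvDigit, pv_digit_mem]; exact h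
      rw [getPairLoop, if_pos h, ih, List.takeWhile_cons_of_pos hd, List.dropWhile_cons_of_pos hd]
      simp [pv_LE_append]
      ring
    · have hd : ¬ pvDigit c = true := fun hc =>
        h ((pv_digit_mem c).mp (by simpa [pvDigit] using hc))
      rw [getPairLoop, if_neg h, List.takeWhile_cons_of_neg hd, List.dropWhile_cons_of_neg hd]
      simp [pvLE]

theorem pv_take_eq (cs : List Char) :
    cs.take (cs.length - (cs.dropWhile pvDigit).length) = cs.takeWhile pvDigit := by
  have hlen : (cs.takeWhile pvDigit).length + (cs.dropWhile pvDigit).length = cs.length := by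
    rw [← List.length_append, List.takeWhile_append_dropWhile]
  rw [show cs.length - (cs.dropWhile pvDigit).length = (cs.takeWhile pvDigit).length by omega]
  exact (List.prefix_iff_eq_take.mp (List.takeWhile_prefix pvDigit)).symm

-- ===== VERDICT (by name: the statement is the Claim_ definition above) =====
theorem getPair_spec : Claim_equal_getPair := by
  intro v _
  unfold Spec_getPair getPair getPair_alt
  have hp : (fun c => decide (c ∈ pvDigitChars)) = pvDigit := by
    funext c; simp [pvDigit]
  dsimp only
  rw [hp, pv_take_eq, pv_loop_eq, pv_fold_eq]
  simp
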